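-- pv_equiv track=rewrite | github.com/TranQuangHuy203457/watering | scripts/simulate_overload.py | generate_jobs_for_scenario
-- ===== SOURCE A (Python) =====
-- SIM_MS = 120_000  # total simulation time in ms
--
-- TASKS = [
--     ("Sensor", 2000, 50, 1),
--     ("Network", 10000, 300, 3),
--     ("Display", 5000, 100, 2),
--     ("Switch", 60000, 200, 2),
-- ]
--
-- def generate_jobs_for_scenario(burst_start, burst_end, burst_factor, inject_sporadic=False):
--     jobs = []
--     for name, period, wcet, prio in TASKS:
--         t = 0
--         while t < SIM_MS:
--             jobs.append((t, name, period, wcet, prio))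
--             t += period
--     # optionally inject extra sporadic heavy jobs during burst to force overload
--     if inject_sporadic:
--         mid = burst_start + (burst_end - burst_start)//2
--         # add several heavy sporadic tasks at nearly same arrival with tight deadlines
--         for i in range(5):
--             # (arrival, name, period, wcet, prio)
--             jobs.append((mid + i*5, f"Sporadic{i}", 2000, 1000, 5))
--     jobs.sort()
--     # return precomputed jobs plus burst params via closure
--     return jobs, (burst_start, burst_end, burst_factor)
-- ===== SOURCE B (Python) =====
-- SIM_MS = 120_000  # total simulation time in ms
--
-- TASKS = [
--     ("Sensor", 2000, 50, 1),
--     ("Network", 10000, 300, 3),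
--     ("Display", 5000, 100, 2),
--     ("Switch", 60000, 200, 2),
-- ]
--
--
-- def _merge2(xs, ys):
--     """Stable two-way merge of two sorted job lists (full-tuple order)."""
--     out = []
--     i = j = 0
--     while i < len(xs) and j < len(ys):
--         if ys[j] < xs[i]:
--             out.append(ys[j])
--             j += 1
--         else:
--             out.append(xs[i])
--             i += 1
--     out.extend(xs[i:])
--     out.extend(ys[j:])
--     return out
--
--
-- def generate_jobs_for_scenario(burst_start, burst_end, burst_factor, inject_sporadic=False):
--     # each per-task run is emitted already sorted; the result is a k-way merge
--     runs = [[(t, name, period, wcet, prio) for t in range(0, SIM_MS, period)]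
--             for name, period, wcet, prio in TASKS]
--     if inject_sporadic:
--         mid = burst_start + (burst_end - burst_start) // 2
--         runs.append([(mid + i * 5, f"Sporadic{i}", 2000, 1000, 5) for i in range(5)])
--     merged = []
--     for run in runs:
--         merged = _merge2(merged, run)
--     return merged, (burst_start, burst_end, burst_factor)
-- ===== Notes on version B (the rewrite author's own statement) =====
-- stated objective: alternative
-- what changed: B builds each task's job sequence as an already-sorted run (and the sporadic jobs as one sorted run) and combines them with a stable two-way merge folded over the runs, instead of appending everything into one list and calling jobs.sort().
import Mathlib
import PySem

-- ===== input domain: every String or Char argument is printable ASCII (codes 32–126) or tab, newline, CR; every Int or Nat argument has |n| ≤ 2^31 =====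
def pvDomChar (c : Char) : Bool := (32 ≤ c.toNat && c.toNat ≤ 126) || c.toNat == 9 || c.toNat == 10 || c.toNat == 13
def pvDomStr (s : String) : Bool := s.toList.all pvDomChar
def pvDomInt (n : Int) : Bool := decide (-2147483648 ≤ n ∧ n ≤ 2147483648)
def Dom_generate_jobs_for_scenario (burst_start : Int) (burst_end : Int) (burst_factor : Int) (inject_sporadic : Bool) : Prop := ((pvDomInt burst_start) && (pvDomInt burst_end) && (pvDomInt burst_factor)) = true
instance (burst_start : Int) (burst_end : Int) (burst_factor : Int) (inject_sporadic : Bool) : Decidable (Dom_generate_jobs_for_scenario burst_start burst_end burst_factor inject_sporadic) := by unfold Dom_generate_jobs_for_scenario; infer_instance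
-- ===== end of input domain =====

-- B replaces append-everything-then-sort by per-task already-sorted runs combined with a
-- stable two-way merge folded over the runs (alternative decomposition; same return value).

abbrev pvJob := Int × String × Int × Int × Int

-- Python's comparison on the 5-tuples (lexicographic), as the sort key for jobs.sort()
def pvKey (j : pvJob) : Lex (Int × Lex (String × Lex (Int × Lex (Int × Int)))) :=
  toLex (j.1, toLex (j.2.1, toLex (j.2.2.1, toLex (j.2.2.2.1, j.2.2.2.2))))

-- ===== PORT A =====
def pvTASKS : List (String × Int × Int × Int) :=
  [("Sensor", 2000, 50, 1), ("Network", 10000, 300, 3), ("Display", 5000, 100, 2), ("Switch", 60000, 200, 2)]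

-- the inner 'while t < SIM_MS' loop; fuel 120000 is an upper bound on the iterations taken
def pvWhileJobs (name : String) (period wcet prio : Int) (t : Int) (fuel : Nat) : List pvJob :=
  match fuel with
  | 0 => []
  | Nat.succ f =>
    if t < 120000 then (t, name, period, wcet, prio) :: pvWhileJobs name period wcet prio (t + period) f
    else []

def generate_jobs_for_scenario (burst_start : Int) (burst_end : Int) (burst_factor : Int) (inject_sporadic : Bool) : (List (Int × String × Int × Int × Int)) × (Int × Int × Int) :=
  let jobs := pvTASKS.foldl (fun acc tk => acc ++ pvWhileJobs tk.1 tk.2.1 tk.2.2.1 tk.2.2.2 0 120000) []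
  let jobs :=
    if inject_sporadic then
      let mid := burst_start + PySem.Int.floordiv (burst_end - burst_start) 2
      jobs ++ (PySem.List.pyRange 0 5 1).map
        (fun i => (mid + i * 5, "Sporadic" ++ PySem.Int.toStr i, (2000 : Int), (1000 : Int), (5 : Int)))
    else jobs
  (PySem.List.sorted jobs pvKey false, (burst_start, burst_end, burst_factor))

-- ===== PORT B =====
-- Python's 'ys[j] < xs[i]' on job tuples, written out lexicographically
def pvJobLt (a b : pvJob) : Bool :=
  decide (a.1 < b.1) || (decide (a.1 = b.1) &&
    (decide (a.2.1 < b.2.1) || (decide (a.2.1 = b.2.1) &&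
      (decide (a.2.2.1 < b.2.2.1) || (decide (a.2.2.1 = b.2.2.1) &&
        (decide (a.2.2.2.1 < b.2.2.2.1) || (decide (a.2.2.2.1 = b.2.2.2.1) &&
          decide (a.2.2.2.2 < b.2.2.2.2))))))))

-- _merge2: stable two-way merge of two sorted runs
def pvMerge2 : List pvJob → List pvJob → List pvJob
  | [], ys => ys
  | x :: xs, [] => x :: xs
  | x :: xs, y :: ys =>
    if pvJobLt y x then y :: pvMerge2 (x :: xs) ys
    else x :: pvMerge2 xs (y :: ys)
termination_by xs ys => xs.length + ys.length

def pvRuns (burst_start burst_end : Int) (inject_sporadic : Bool) : List (List pvJob) :=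
  let runs := pvTASKS.map (fun tk =>
    (PySem.List.pyRange 0 120000 tk.2.1).map (fun t => (t, tk.1, tk.2.1, tk.2.2.1, tk.2.2.2)))
  if inject_sporadic then
    let mid := burst_start + PySem.Int.floordiv (burst_end - burst_start) 2
    runs ++ [(PySem.List.pyRange 0 5 1).map
      (fun i => (mid + i * 5, "Sporadic" ++ PySem.Int.toStr i, (2000 : Int), (1000 : Int), (5 : Int)))]
  else runs

def generate_jobs_for_scenario_alt (burst_start : Int) (burst_end : Int) (burst_factor : Int) (inject_sporadic : Bool) : (List (Int × String × Int × Int × Int)) × (Int × Int × Int) :=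
  ((pvRuns burst_start burst_end inject_sporadic).foldl pvMerge2 [], (burst_start, burst_end, burst_factor))

-- ===== PRECONDITION & SPEC =====
def Spec_generate_jobs_for_scenario (burst_start : Int) (burst_end : Int) (burst_factor : Int) (inject_sporadic : Bool) (out : (List (Int × String × Int × Int × Int)) × (Int × Int × Int)) : Prop := out = generate_jobs_for_scenario_alt burst_start burst_end burst_factor inject_sporadic
instance (burst_start : Int) (burst_end : Int) (burst_factor : Int) (inject_sporadic : Bool) (out : (List (Int × String × Int × Int × Int)) × (Int × Int × Int)) : Decidable (Spec_generate_jobs_for_scenario burst_start burst_end burst_factor inject_sporadic out) := by unfold Spec_generate_jobs_for_scenario; infer_instance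

-- ===== CLAIM (what is proved, stated in full; the proofs are below) =====
def Claim_equal_generate_jobs_for_scenario : Prop := ∀ (burst_start : Int) (burst_end : Int) (burst_factor : Int) (inject_sporadic : Bool), Dom_generate_jobs_for_scenario burst_start burst_end burst_factor inject_sporadic → Spec_generate_jobs_for_scenario burst_start burst_end burst_factor inject_sporadic (generate_jobs_for_scenario burst_start burst_end burst_factor inject_sporadic)

-- ===== LEMMAS AND PROOFS =====

theorem pvJobLt_iff (a b : pvJob) : pvJobLt a b = true ↔ pvKey a < pvKey b := by
  simp [pvJobLt, pvKey, Prod.Lex.toLex_lt_toLex]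

theorem pvKey_inj {a b : pvJob} (h : pvKey a = pvKey b) : a = b := by
  simp [pvKey, Prod.ext_iff] at h
  exact Prod.ext h.1 (Prod.ext h.2.1 (Prod.ext h.2.2.1 (Prod.ext h.2.2.2.1 h.2.2.2.2)))

theorem pvKey_lt_of_fst {a b : pvJob} (h : a.1 < b.1) : pvKey a < pvKey b := by
  simp only [pvKey, Prod.Lex.toLex_lt_toLex]
  exact Or.inl h

theorem pvKey_ne_of_name {a b : pvJob} (h : a.2.1 ≠ b.2.1) : pvKey a ≠ pvKey b :=
  fun he => h (by rw [pvKey_inj he])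

theorem pvMerge2_perm (xs ys : List pvJob) : (pvMerge2 xs ys).Perm (xs ++ ys) := by
  induction xs, ys using pvMerge2.induct with
  | case1 ys => simp [pvMerge2]
  | case2 x xs => simp [pvMerge2]
  | case3 x xs y ys h ih =>
    rw [pvMerge2, if_pos h]
    exact (ih.cons y).trans List.perm_middle.symm
  | case4 x xs y ys h ih =>
    rw [pvMerge2, if_neg h]
    exact ih.cons x

theorem pvMerge2_pairwise (xs ys : List pvJob)
    (hx : xs.Pairwise (fun a b => pvKey a < pvKey b))
    (hy : ys.Pairwise (fun a b => pvKey a < pvKey b))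
    (hne : ∀ a ∈ xs, ∀ b ∈ ys, pvKey a ≠ pvKey b) :
    (pvMerge2 xs ys).Pairwise (fun a b => pvKey a < pvKey b) := by
  induction xs, ys using pvMerge2.induct with
  | case1 ys => simpa [pvMerge2] using hy
  | case2 x xs => simpa [pvMerge2] using hx
  | case3 x xs y ys h ih =>
    rw [pvMerge2, if_pos h]
    have hyx : pvKey y < pvKey x := (pvJobLt_iff y x).mp h
    refine List.Pairwise.cons ?_ (ih hx hy.tail (fun a ha b hb => hne a ha b (List.mem_cons_of_mem y hb)))
    intro z hz
    rcases List.mem_append.mp ((pvMerge2_perm (x :: xs) ys).subset hz) with hz' | hz'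
    · rcases List.mem_cons.mp hz' with rfl | hz''
      · exact hyx
      · exact hyx.trans (List.rel_of_pairwise_cons hx hz'')
    · exact List.rel_of_pairwise_cons hy hz'
  | case4 x xs y ys h ih =>
    rw [pvMerge2, if_neg h]
    have hxy : pvKey x < pvKey y := by
      rcases lt_trichotomy (pvKey x) (pvKey y) with h1 | h1 | h1
      · exact h1
      · exact absurd h1 (hne x List.mem_cons_self y List.mem_cons_self)
      · exact absurd ((pvJobLt_iff y x).mpr h1) (by simp [h])
    refine List.Pairwise.cons ?_ (ih hx.tail hy (fun a ha b hb => hne a (List.mem_cons_of_mem x ha) b hb))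
    intro z hz
    rcases List.mem_append.mp ((pvMerge2_perm xs (y :: ys)).subset hz) with hz' | hz'
    · exact List.rel_of_pairwise_cons hx hz'
    · rcases List.mem_cons.mp hz' with rfl | hz''
      · exact hxy
      · exact hxy.trans (List.rel_of_pairwise_cons hy hz'')

-- closed base data: A's append loop and B's four periodic runs
def pvBase : List pvJob :=
  pvTASKS.foldl (fun acc tk => acc ++ pvWhileJobs tk.1 tk.2.1 tk.2.2.1 tk.2.2.2 0 120000) []

def pvR (i : Nat) : List pvJob :=
  (PySem.List.pyRange 0 120000 (pvTASKS[i]!.2.1)).map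
    (fun t => (t, pvTASKS[i]!.1, pvTASKS[i]!.2.1, pvTASKS[i]!.2.2.1, pvTASKS[i]!.2.2.2))

def pvM : List pvJob := pvMerge2 (pvMerge2 (pvMerge2 (pvR 0) (pvR 1)) (pvR 2)) (pvR 3)

theorem pvBase_eq : pvBase = ((pvR 0 ++ pvR 1) ++ pvR 2) ++ pvR 3 := by decide

theorem pvM_perm : pvM.Perm pvBase := by
  rw [pvBase_eq]
  exact ((pvMerge2_perm _ (pvR 3)).trans
    (List.Perm.append_right (pvR 3) ((pvMerge2_perm _ (pvR 2)).trans
      (List.Perm.append_right (pvR 2) (pvMerge2_perm (pvR 0) (pvR 1))))))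

-- decidable facts about the four runs only (never about the merged list)
theorem pvR_name : (∀ a ∈ pvR 0, a.2.1 = "Sensor") ∧ (∀ a ∈ pvR 1, a.2.1 = "Network")
    ∧ (∀ a ∈ pvR 2, a.2.1 = "Display") ∧ (∀ a ∈ pvR 3, a.2.1 = "Switch") := by decide

theorem pvR_pw : ((pvR 0).Pairwise (fun a b => pvJobLt a b = true))
    ∧ ((pvR 1).Pairwise (fun a b => pvJobLt a b = true))
    ∧ ((pvR 2).Pairwise (fun a b => pvJobLt a b = true))
    ∧ ((pvR 3).Pairwise (fun a b => pvJobLt a b = true)) := by decide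

theorem pvR_wcet : ∀ i ∈ [0, 1, 2, 3], ∀ a ∈ pvR i, a.2.2.2.1 ≠ (1000 : Int) := by decide

theorem pvM_mem : ∀ a ∈ pvM, a ∈ pvR 0 ∨ a ∈ pvR 1 ∨ a ∈ pvR 2 ∨ a ∈ pvR 3 := by
  intro a ha
  rcases List.mem_append.mp ((pvMerge2_perm _ _).subset ha) with h | h
  · rcases List.mem_append.mp ((pvMerge2_perm _ _).subset h) with h | h
    · rcases List.mem_append.mp ((pvMerge2_perm _ _).subset h) with h | h
      · exact Or.inl h
      · exact Or.inr (Or.inl h)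
    · exact Or.inr (Or.inr (Or.inl h))
  · exact Or.inr (Or.inr (Or.inr h))

theorem pvM_pairwise : pvM.Pairwise (fun a b => pvKey a < pvKey b) := by
  have pw : ∀ i, i < 4 → (pvR i).Pairwise (fun a b => pvKey a < pvKey b) := by
    intro i hi
    interval_cases i <;>
      exact (by first
        | exact pvR_pw.1
        | exact pvR_pw.2.1
        | exact pvR_pw.2.2.1
        | exact pvR_pw.2.2.2 : List.Pairwise (fun a b => pvJobLt a b = true) _).imp
        (fun hab => (pvJobLt_iff _ _).mp hab)
  have h01 : ∀ a ∈ pvR 0, ∀ b ∈ pvR 1, pvKey a ≠ pvKey b := fun a ha b hb =>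
    pvKey_ne_of_name (by rw [pvR_name.1 a ha, pvR_name.2.1 b hb]; decide)
  have p01 := pvMerge2_pairwise _ _ (pw 0 (by omega)) (pw 1 (by omega)) h01
  have m01 : ∀ a ∈ pvMerge2 (pvR 0) (pvR 1), a.2.1 = "Sensor" ∨ a.2.1 = "Network" := by
    intro a ha
    rcases List.mem_append.mp ((pvMerge2_perm _ _).subset ha) with h | h
    · exact Or.inl (pvR_name.1 a h)
    · exact Or.inr (pvR_name.2.1 a h)
  have h2 : ∀ a ∈ pvMerge2 (pvR 0) (pvR 1), ∀ b ∈ pvR 2, pvKey a ≠ pvKey b := fun a ha b hb =>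
    pvKey_ne_of_name (by rcases m01 a ha with h | h <;> rw [h, pvR_name.2.2.1 b hb] <;> decide)
  have p012 := pvMerge2_pairwise _ _ p01 (pw 2 (by omega)) h2
  have m012 : ∀ a ∈ pvMerge2 (pvMerge2 (pvR 0) (pvR 1)) (pvR 2),
      a.2.1 = "Sensor" ∨ a.2.1 = "Network" ∨ a.2.1 = "Display" := by
    intro a ha
    rcases List.mem_append.mp ((pvMerge2_perm _ _).subset ha) with h | h
    · rcases m01 a h with h' | h'
      · exact Or.inl h'
      · exact Or.inr (Or.inl h')
    · exact Or.inr (Or.inr (pvR_name.2.2.1 a h))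
  have h3 : ∀ a ∈ pvMerge2 (pvMerge2 (pvR 0) (pvR 1)) (pvR 2), ∀ b ∈ pvR 3, pvKey a ≠ pvKey b :=
    fun a ha b hb =>
      pvKey_ne_of_name (by rcases m012 a ha with h | h | h <;> rw [h, pvR_name.2.2.2 b hb] <;> decide)
  exact pvMerge2_pairwise _ _ p012 (pw 3 (by omega)) h3

theorem pvM_wcet : ∀ a ∈ pvM, a.2.2.2.1 ≠ (1000 : Int) := by
  intro a ha
  rcases pvM_mem a ha with h | h | h | h
  · exact pvR_wcet 0 (by decide) a h
  · exact pvR_wcet 1 (by decide) a h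
  · exact pvR_wcet 2 (by decide) a h
  · exact pvR_wcet 3 (by decide) a h

def pvSpor (mid : Int) : List pvJob :=
  (PySem.List.pyRange 0 5 1).map
    (fun i => (mid + i * 5, "Sporadic" ++ PySem.Int.toStr i, (2000 : Int), (1000 : Int), (5 : Int)))

theorem pvSpor_pairwise (mid : Int) : (pvSpor mid).Pairwise (fun a b => pvKey a < pvKey b) := by
  have hr : PySem.List.pyRange 0 5 1 = [0, 1, 2, 3, 4] := by decide
  simp only [pvSpor, hr, List.map]
  refine List.Pairwise.cons ?_ (List.Pairwise.cons ?_ (List.Pairwise.cons ?_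
    (List.Pairwise.cons ?_ (List.Pairwise.cons ?_ List.Pairwise.nil))))
  · intro z hz
    simp only [List.mem_cons, List.not_mem_nil, or_false] at hz
    apply pvKey_lt_of_fst
    rcases hz with rfl | rfl | rfl | rfl <;> omega
  · intro z hz
    simp only [List.mem_cons, List.not_mem_nil, or_false] at hz
    apply pvKey_lt_of_fst
    rcases hz with rfl | rfl | rfl <;> omega
  · intro z hz
    simp only [List.mem_cons, List.not_mem_nil, or_false] at hz
    apply pvKey_lt_of_fst
    rcases hz with rfl | rfl <;> omega
  · intro z hz
    simp only [List.mem_cons, List.not_mem_nil, or_false] at hz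
    apply pvKey_lt_of_fst
    rcases hz with rfl
    omega
  · intro z hz
    simp at hz

theorem pvSpor_wcet (mid : Int) : ∀ b ∈ pvSpor mid, b.2.2.2.1 = (1000 : Int) := by
  have hr : PySem.List.pyRange 0 5 1 = [0, 1, 2, 3, 4] := by decide
  simp [pvSpor, hr]

theorem pvM_spor_ne (mid : Int) : ∀ a ∈ pvM, ∀ b ∈ pvSpor mid, pvKey a ≠ pvKey b := by
  intro a ha b hb h
  exact pvM_wcet a ha (by rw [pvKey_inj h]; exact pvSpor_wcet mid b hb)

-- ===== VERDICT (by name: the statement is the Claim_ definition above) =====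
set_option maxRecDepth 20000 in
theorem generate_jobs_for_scenario_spec : Claim_equal_generate_jobs_for_scenario := by
  intro bs be bf sp _
  unfold Spec_generate_jobs_for_scenario generate_jobs_for_scenario generate_jobs_for_scenario_alt pvRuns
  have hnil : ∀ ys, pvMerge2 [] ys = ys := fun ys => by simp [pvMerge2]
  have hR0 : pvR 0 = List.map (fun t => (t, "Sensor", (2000 : Int), (50 : Int), (1 : Int))) (PySem.List.pyRange 0 120000 2000) := rfl
  have hR1 : pvR 1 = List.map (fun t => (t, "Network", (10000 : Int), (300 : Int), (3 : Int))) (PySem.List.pyRange 0 120000 10000) := rfl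
  have hR2 : pvR 2 = List.map (fun t => (t, "Display", (5000 : Int), (100 : Int), (2 : Int))) (PySem.List.pyRange 0 120000 5000) := rfl
  have hR3 : pvR 3 = List.map (fun t => (t, "Switch", (60000 : Int), (200 : Int), (2 : Int))) (PySem.List.pyRange 0 120000 60000) := rfl
  have hBase : pvBase = [] ++ pvWhileJobs "Sensor" 2000 50 1 0 120000 ++ pvWhileJobs "Network" 10000 300 3 0 120000
      ++ pvWhileJobs "Display" 5000 100 2 0 120000 ++ pvWhileJobs "Switch" 60000 200 2 0 120000 := rfl
  cases sp with
  | false =>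
    simp only [if_neg Bool.false_ne_true, pvTASKS, List.map, List.foldl]
    refine Prod.ext ?_ rfl
    simp only [hnil]
    rw [← hR0, ← hR1, ← hR2, ← hR3, ← hBase]
    show PySem.List.sorted pvBase pvKey false = pvM
    exact PySem.List.sorted_eq_of_perm_of_pairwise_lt pvBase pvM pvKey pvM_perm pvM_pairwise
  | true =>
    simp only [if_pos, pvTASKS, List.map, List.foldl_append, List.foldl]
    refine Prod.ext ?_ rfl
    simp only [hnil]
    have hSpor : pvSpor (bs + PySem.Int.floordiv (be - bs) 2)
        = List.map (fun i => (bs + PySem.Int.floordiv (be - bs) 2 + i * 5, "Sporadic" ++ PySem.Int.toStr i,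
            (2000 : Int), (1000 : Int), (5 : Int))) (PySem.List.pyRange 0 5 1) := rfl
    rw [← hR0, ← hR1, ← hR2, ← hR3, ← hSpor, ← hBase]
    show PySem.List.sorted (pvBase ++ pvSpor (bs + PySem.Int.floordiv (be - bs) 2)) pvKey false
        = pvMerge2 pvM (pvSpor (bs + PySem.Int.floordiv (be - bs) 2))
    set mid := bs + PySem.Int.floordiv (be - bs) 2
    refine PySem.List.sorted_eq_of_perm_of_pairwise_lt _ _ pvKey ?_ ?_
    · exact (pvMerge2_perm pvM (pvSpor mid)).trans (List.Perm.append_right (pvSpor mid) pvM_perm)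
    · exact pvMerge2_pairwise pvM (pvSpor mid) pvM_pairwise (pvSpor_pairwise mid) (pvM_spor_ne mid)
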